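-- pv_equiv track=rewrite | github.com/981377660LMT/algorithm-study | 20_杂题/atc競プロ/AtCoder Beginner Contest/191/F - GCD or MIN-多个数的gcd.py | gcdOrMin
-- ===== SOURCE A (Python) =====
-- from collections import defaultdict
-- from typing import List
--
-- def gcdOrMin(nums: List[int]) -> int:
--     mp = defaultdict(list)
--     for num in nums:
--         for factor in getFactors(num):
--             mp[factor].append(num)
--     groupGcd = defaultdict(int)
--     for factor, group in mp.items():
--         g = tuple(group)
--         groupGcd[g] = max(groupGcd[g], factor)
--     min_ = min(nums)
--     return sum(v <= min_ for v in groupGcd.values())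
--
-- def getFactors(n: int) -> List[int]:
--     """n 的所有因数 O(sqrt(n))"""
--     if n <= 0:
--         return []
--     small, big = [], []
--     upper = int(n**0.5) + 1
--     for i in range(1, upper):
--         if n % i == 0:
--             small.append(i)
--             if i != n // i:
--                 big.append(n // i)
--     return small + big[::-1]
-- ===== SOURCE B (Python) =====
-- import math
--
-- def gcdOrMin(nums):
--     # running gcd per factor; a divisibility group's max factor equals the
--     # gcd of that group, so fixed points f == gcd(group(f)) count the groups
--     best = {}
--     for num in nums:
--         if num > 0:
--             for f in _factors(num):
--                 best[f] = math.gcd(best.get(f, 0), num)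
--     min_ = min(nums)
--     return sum(1 for f, g in best.items() if g == f and f <= min_)
--
-- def _factors(n):
--     fs = []
--     i = 1
--     while i * i <= n:
--         if n % i == 0:
--             fs.append(i)
--             if i * i != n:
--                 fs.append(n // i)
--         i += 1
--     return fs
-- ===== Notes on version B (the rewrite author's own statement) =====
-- stated objective: simpler
-- what changed: Instead of collecting the full membership list per factor and then grouping equal lists via a tuple-keyed dict to take each group's max factor, B keeps one running gcd per factor and counts the fixed points gcd(group(f)) == f with f <= min(nums), dropping the whole grouping pass.
import Mathlib
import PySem

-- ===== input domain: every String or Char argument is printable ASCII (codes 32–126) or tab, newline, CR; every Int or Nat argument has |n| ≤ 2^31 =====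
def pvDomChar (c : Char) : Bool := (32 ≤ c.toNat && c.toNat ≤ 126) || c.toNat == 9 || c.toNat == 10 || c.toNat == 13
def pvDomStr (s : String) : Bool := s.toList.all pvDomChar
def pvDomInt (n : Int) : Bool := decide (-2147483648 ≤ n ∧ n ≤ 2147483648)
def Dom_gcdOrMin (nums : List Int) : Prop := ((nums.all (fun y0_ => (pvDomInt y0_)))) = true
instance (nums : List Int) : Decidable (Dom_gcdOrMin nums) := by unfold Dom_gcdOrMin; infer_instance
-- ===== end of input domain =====

-- B replaces A's per-factor membership lists and the tuple-grouping/max pass by one running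
-- gcd per factor, counting fixed points gcd(group(f)) == f with f ≤ min(nums) (objective: simpler).

-- ===== PORT A =====
-- getFactors: int(n**0.5) is exactly Nat.sqrt on the domain |n| ≤ 2^31 (double sqrt is exact there)
def getFactors (n : Int) : List Int :=
  if n ≤ 0 then []
  else
    let upper : Int := (Int.ofNat n.toNat.sqrt) + 1
    let sb :=
      (PySem.List.pyRange 1 upper 1).foldl
        (fun (sb : List Int × List Int) i =>
          if PySem.Int.mod n i = 0 then
            (sb.1 ++ [i],
             if i ≠ PySem.Int.floordiv n i then sb.2 ++ [PySem.Int.floordiv n i] else sb.2)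
          else sb)
        ([], [])
    sb.1 ++ sb.2.reverse  -- big[::-1] is List.reverse (PySem.List.slice?_none_none_neg_one)

def gcdOrMin (nums : List Int) : Int :=
  let mp : PySem.Dict Int (List Int) :=
    nums.foldl
      (fun mp num =>
        (getFactors num).foldl (fun mp factor => mp.modify factor [] (· ++ [num])) mp)
      PySem.Dict.empty
  let groupGcd : PySem.Dict (List Int) Int :=
    mp.items.foldl (fun d fg => d.modify fg.2 0 (fun v => max v fg.1)) PySem.Dict.empty
  match PySem.List.min? nums (fun x => x) with
  | none => 0  -- min([]) raises ValueError; excluded by Pre_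
  | some min_ => (groupGcd.values.map (fun v => if v ≤ min_ then (1 : Int) else 0)).sum

-- ===== PORT B =====
def pyGcd (a b : Int) : Int := (Int.gcd a b : Int)  -- math.gcd of two ints (nonnegative gcd)

-- _factors: fs = []; i = 1; while i * i <= n: append i and (if i*i != n) n // i; i += 1
def altFactorsGo (n : Int) (fs : List Int) (i : Nat) : List Int :=
  if (i : Int) * (i : Int) ≤ n then
    altFactorsGo n
      (if PySem.Int.mod n (i : Int) = 0 then
         (if (i : Int) * (i : Int) ≠ n then (fs ++ [(i : Int)]) ++ [PySem.Int.floordiv n (i : Int)]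
          else fs ++ [(i : Int)])
       else fs)
      (i + 1)
  else fs
termination_by n.toNat + 1 - i
decreasing_by
  have hi : (i : Int) ≤ n := by
    rcases Nat.eq_zero_or_pos i with h0 | h0
    · subst h0; simp_all
    · have h1 : (1 : Int) ≤ (i : Int) := by exact_mod_cast h0
      nlinarith
  omega

def gcdOrMin_alt (nums : List Int) : Int :=
  let best : PySem.Dict Int Int :=
    nums.foldl
      (fun best num =>
        if num > 0 then
          (altFactorsGo num [] 1).foldl (fun best f => best.insert f (pyGcd (best.getD f 0) num)) best
        else best)
      PySem.Dict.empty
  match PySem.List.min? nums (fun x => x) with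
  | none => 0  -- min([]) raises ValueError; excluded by Pre_
  | some min_ =>
    (best.items.map (fun fg => if fg.2 = fg.1 ∧ fg.1 ≤ min_ then (1 : Int) else 0)).sum

-- ===== PRECONDITION & SPEC =====
-- min(nums) raises ValueError on the empty list; both implementations raise there.
def Pre_gcdOrMin (nums : List Int) : Prop := nums ≠ []
instance (nums : List Int) : Decidable (Pre_gcdOrMin nums) := by unfold Pre_gcdOrMin; infer_instance
def pvWitness_gcdOrMin : List Int := [6, 10, 2]

def Spec_gcdOrMin (nums : List Int) (out : Int) : Prop := out = gcdOrMin_alt nums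
instance (nums : List Int) (out : Int) : Decidable (Spec_gcdOrMin nums out) := by unfold Spec_gcdOrMin; infer_instance

-- ===== CLAIM (what is proved, stated in full; the proofs are below) =====
def Claim_equal_gcdOrMin : Prop := ∀ (nums : List Int), Dom_gcdOrMin nums → Pre_gcdOrMin nums → Spec_gcdOrMin nums (gcdOrMin nums)

-- ===== LEMMAS AND PROOFS =====

lemma getFactors_of_nonpos {n : Int} (h : n ≤ 0) : getFactors n = [] := by
  simp [getFactors, h]

lemma getFactors_fold (n : Int) (l : List Int) (s0 b0 : List Int) :
  l.foldl (fun (sb : List Int × List Int) i =>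
      if PySem.Int.mod n i = 0 then
        (sb.1 ++ [i], if i ≠ PySem.Int.floordiv n i then sb.2 ++ [PySem.Int.floordiv n i] else sb.2)
      else sb) (s0, b0)
  = (s0 ++ l.filter (fun i => decide (PySem.Int.mod n i = 0)),
     b0 ++ (l.filter (fun i => decide (PySem.Int.mod n i = 0 ∧ i ≠ PySem.Int.floordiv n i))).map (fun i => PySem.Int.floordiv n i)) := by
  induction l generalizing s0 b0 with
  | nil => simp
  | cons a l ih =>
      rw [List.foldl_cons]
      by_cases h1 : PySem.Int.mod n a = 0
      · by_cases h2 : a ≠ PySem.Int.floordiv n a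
        · rw [if_pos h1, if_pos h2, ih]; simp [h1, h2]
        · rw [if_pos h1, if_neg h2, ih]; simp [h1, h2]
      · rw [if_neg h1, ih]; simp [h1]

lemma getFactors_eq (n : Int) (hn : 0 < n) :
    getFactors n =
      (PySem.List.pyRange 1 (((n.toNat.sqrt : Nat) : Int) + 1) 1).filter
          (fun i => decide (PySem.Int.mod n i = 0))
        ++ (((PySem.List.pyRange 1 (((n.toNat.sqrt : Nat) : Int) + 1) 1).filter
              (fun i => decide (PySem.Int.mod n i = 0 ∧ i ≠ PySem.Int.floordiv n i))).map
            (fun i => PySem.Int.floordiv n i)).reverse := by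
  rw [getFactors, if_neg (by omega : ¬ n ≤ 0)]
  dsimp only
  rw [getFactors_fold]
  simp

-- sqrt bounds on the Int side
lemma sqrt_sq_le {n : Int} (hn : 0 < n) :
    ((n.toNat.sqrt : Nat) : Int) * ((n.toNat.sqrt : Nat) : Int) ≤ n := by
  have h := Nat.sqrt_le' n.toNat
  rw [pow_two] at h
  have h2 : ((n.toNat.sqrt * n.toNat.sqrt : Nat) : Int) ≤ ((n.toNat : Nat) : Int) := Int.ofNat_le.mpr h
  push_cast at h2
  have h3 : ((n.toNat : Nat) : Int) = n := Int.toNat_of_nonneg (le_of_lt hn)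
  linarith
lemma lt_succ_sqrt_sq {n : Int} (hn : 0 < n) :
    n < (((n.toNat.sqrt : Nat) : Int) + 1) * (((n.toNat.sqrt : Nat) : Int) + 1) := by
  have h := Nat.lt_succ_sqrt' n.toNat
  rw [Nat.succ_eq_add_one, pow_two] at h
  have h2 : ((n.toNat : Nat) : Int) < (((n.toNat.sqrt + 1) * (n.toNat.sqrt + 1) : Nat) : Int) := Int.ofNat_lt.mpr h
  push_cast at h2
  have h3 : ((n.toNat : Nat) : Int) = n := Int.toNat_of_nonneg (le_of_lt hn)
  nlinarith

lemma mem_getFactors {n f : Int} (hn : 0 < n) : f ∈ getFactors n ↔ 1 ≤ f ∧ f ∣ n := by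
  rw [getFactors_eq n hn]
  set s : Int := ((n.toNat.sqrt : Nat) : Int) with hs
  have hs2 : s * s ≤ n := sqrt_sq_le hn
  have hs3 : n < (s + 1) * (s + 1) := lt_succ_sqrt_sq hn
  have hs0 : 0 ≤ s := by rw [hs]; exact Int.natCast_nonneg _
  simp only [List.mem_append, List.mem_reverse, List.mem_filter, List.mem_map,
    PySem.List.mem_pyRange_one, decide_eq_true_eq, PySem.Int.mod_eq_zero_iff_dvd]
  constructor
  · rintro (⟨⟨h1, h2⟩, hdvd⟩ | ⟨i, ⟨⟨hi1, hi2⟩, hdvd, hne⟩, rfl⟩)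
    · exact ⟨h1, hdvd⟩
    · have hipos : 0 < i := hi1
      have hfd : PySem.Int.floordiv n i = n / i := PySem.Int.floordiv_eq_ediv_of_pos hipos
      rw [hfd]
      have hmul : n / i * i = n := Int.ediv_mul_cancel hdvd
      constructor
      · nlinarith [Int.lt_or_le (n / i) 1]
      · exact ⟨i, by linarith [hmul] ⟩ -- n = n/i * i
  · rintro ⟨h1, hdvd⟩
    by_cases hle : f ≤ s
    · left; exact ⟨⟨h1, by omega⟩, hdvd⟩
    · right
      push_neg at hle
      have hmul : n / f * f = n := Int.ediv_mul_cancel hdvd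
      have hq : 0 < n / f := by nlinarith [Int.lt_or_le (n / f) 1]
      have hinv : n / (n / f) = f := by
        have h2 := Int.mul_ediv_cancel_left f (by omega : n / f ≠ 0)
        rw [hmul] at h2; exact h2
      have hfd : PySem.Int.floordiv n (n / f) = n / (n / f) :=
        PySem.Int.floordiv_eq_ediv_of_pos hq
      have hb : n / f < s + 1 := by nlinarith [Int.lt_or_le (n / f) (s + 1)]
      refine ⟨n / f, ⟨⟨hq, hb⟩, ⟨f, hmul.symm⟩, ?_⟩, ?_⟩
      · rw [hfd, hinv]; omega
      · rw [hfd, hinv]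

lemma div_pos_inv {n i : Int} (hn : 0 < n) (hi : 0 < i) (hdvd : i ∣ n) :
    0 < n / i ∧ n / (n / i) = i := by
  have hmul : n / i * i = n := Int.ediv_mul_cancel hdvd
  have hq : 0 < n / i := by nlinarith [Int.lt_or_le (n / i) 1]
  refine ⟨hq, ?_⟩
  have h2 := Int.mul_ediv_cancel_left i (by omega : n / i ≠ 0)
  rw [hmul] at h2; exact h2

lemma big_gt_sqrt {n i : Int} (hn : 0 < n) (hdvd : i ∣ n) (hi1 : 1 ≤ i)
    (hi2 : i ≤ ((n.toNat.sqrt : Nat) : Int)) (hne : i ≠ n / i) :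
    ((n.toNat.sqrt : Nat) : Int) < n / i := by
  set s : Int := ((n.toNat.sqrt : Nat) : Int) with hs
  have hs2 : s * s ≤ n := sqrt_sq_le hn
  have hmul : n / i * i = n := Int.ediv_mul_cancel hdvd
  have hq : 0 < n / i := (div_pos_inv hn (by omega) hdvd).1
  by_contra hc
  push_neg at hc   -- n / i ≤ s
  have h1 : n / i * i ≤ s * i := by nlinarith
  have h2 : s * i ≤ s * s := by nlinarith
  have he1 : s * i = s * s := by nlinarith
  have hsi : i = s := by
    have hs1 : 1 ≤ s := by nlinarith
    nlinarith
  have : n / i = s := by nlinarith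
  omega

lemma nodup_getFactors (n : Int) : (getFactors n).Nodup := by
  by_cases h : n ≤ 0
  · simp [getFactors, h]
  · push_neg at h
    rw [getFactors_eq n h]
    set s : Int := ((n.toNat.sqrt : Nat) : Int) with hs
    rw [List.nodup_append]
    refine ⟨(PySem.List.nodup_pyRange_one _ _).filter _, List.nodup_reverse.mpr ?_, ?_⟩
    · apply List.Nodup.map_on
      · intro i hi j hj hij
        simp only [List.mem_filter, PySem.List.mem_pyRange_one, decide_eq_true_eq,
          PySem.Int.mod_eq_zero_iff_dvd] at hi hj
        obtain ⟨⟨hi1, _⟩, hdi, _⟩ := hi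
        obtain ⟨⟨hj1, _⟩, hdj, _⟩ := hj
        rw [PySem.Int.floordiv_eq_ediv_of_pos (by omega : (0:Int) < i),
            PySem.Int.floordiv_eq_ediv_of_pos (by omega : (0:Int) < j)] at hij
        have h1 := (div_pos_inv h (by omega : (0:Int) < i) hdi).2
        have h2 := (div_pos_inv h (by omega : (0:Int) < j) hdj).2
        rw [← h1, ← h2, hij]
      · exact (PySem.List.nodup_pyRange_one _ _).filter _
    · intro x hx y hy
      rw [List.mem_filter, PySem.List.mem_pyRange_one] at hx
      rw [List.mem_reverse, List.mem_map] at hy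
      obtain ⟨⟨_, hxle⟩, _⟩ := hx
      simp only [List.mem_filter, PySem.List.mem_pyRange_one, decide_eq_true_eq,
        PySem.Int.mod_eq_zero_iff_dvd] at hy
      obtain ⟨i, ⟨⟨hi1, hi2⟩, hdi, hne⟩, rfl⟩ := hy
      rw [PySem.Int.floordiv_eq_ediv_of_pos (by omega : (0:Int) < i)] at hne ⊢
      have := big_gt_sqrt h hdi hi1 (by omega) hne
      omega

-- proof-side non-accumulator form of the factor while-loop
def pvAltGo (n : Int) (i : Nat) : List Int :=
  if h : (i : Int) * (i : Int) ≤ n then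
    (if PySem.Int.mod n (i : Int) = 0 then
       (i : Int) ::
         (if (i : Int) * (i : Int) ≠ n then [PySem.Int.floordiv n (i : Int)] else [])
     else []) ++ pvAltGo n (i + 1)
  else []
termination_by n.toNat + 1 - i
decreasing_by
  have hi : (i : Int) ≤ n := by
    rcases Nat.eq_zero_or_pos i with h0 | h0
    · subst h0; simpa using h
    · have h1 : (1 : Int) ≤ (i : Int) := by exact_mod_cast h0
      nlinarith
  omega

lemma altGo_acc (n : Int) (fs : List Int) (i : Nat) :
    altFactorsGo n fs i = fs ++ pvAltGo n i := by
  fun_induction altFactorsGo n fs i with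
  | case1 fs i h ih =>
      rw [pvAltGo, dif_pos h]
      split_ifs at ih ⊢ with h1 h2
      · rw [ih]; simp
      · rw [ih]; simp
      · rw [ih]; simp
  | case2 fs i h =>
      rw [pvAltGo, dif_neg h, List.append_nil]

lemma mem_altGo {n : Int} (hn : 0 < n) (i : Nat) (f : Int) :
    f ∈ pvAltGo n i ↔
      ∃ d : Int, (i : Int) ≤ d ∧ d * d ≤ n ∧ d ∣ n ∧
        (f = d ∨ (d * d ≠ n ∧ f = n / d)) := by
  fun_induction pvAltGo n i with
  | case1 i h ih =>
      rw [List.mem_append, ih]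
      constructor
      · rintro (hf | ⟨d, hd1, hd2, hd3, hd4⟩)
        · by_cases hm : PySem.Int.mod n (i : Int) = 0
          · rw [if_pos hm] at hf
            have hdvd : (i : Int) ∣ n := (PySem.Int.mod_eq_zero_iff_dvd n _).mp hm
            have hi0 : (0 : Int) < (i : Int) := by
              rcases Nat.eq_zero_or_pos i with h0 | h0
              · exfalso; subst h0; simp at hdvd; omega
              · exact_mod_cast h0
            rcases List.mem_cons.mp hf with rfl | hf2
            · exact ⟨(i : Int), le_refl _, h, hdvd, Or.inl rfl⟩
            · by_cases hsq : (i : Int) * (i : Int) ≠ n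
              · rw [if_pos hsq] at hf2
                simp only [List.mem_singleton] at hf2
                subst hf2
                exact ⟨(i : Int), le_refl _, h, hdvd,
                  Or.inr ⟨hsq, PySem.Int.floordiv_eq_ediv_of_pos hi0⟩⟩
              · rw [if_neg hsq] at hf2; simp at hf2
          · rw [if_neg hm] at hf; simp at hf
        · refine ⟨d, ?_, hd2, hd3, hd4⟩
          push_cast at hd1; omega
      · rintro ⟨d, hd1, hd2, hd3, hd4⟩
        by_cases hdi : d = (i : Int)
        · subst hdi
          left
          have hi0 : (0 : Int) < (i : Int) := by
            rcases Int.lt_or_le 0 (i : Int) with h0 | h0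
            · exact h0
            · exfalso
              have hz : (i : Int) = 0 := by omega
              rw [hz] at hd3
              simp at hd3; omega
          rw [if_pos ((PySem.Int.mod_eq_zero_iff_dvd n (i : Int)).mpr hd3)]
          rcases hd4 with rfl | ⟨hsq, rfl⟩
          · exact List.mem_cons_self
          · rw [if_pos hsq]
            rw [PySem.Int.floordiv_eq_ediv_of_pos hi0]
            exact List.mem_cons_of_mem _ (List.mem_singleton.mpr rfl)
        · right
          exact ⟨d, by push_cast; omega, hd2, hd3, hd4⟩
  | case2 i h =>
      simp only [List.not_mem_nil, false_iff]
      rintro ⟨d, hd1, hd2, hd3, hd4⟩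
      push_neg at h
      have : (0:Int) ≤ (i:Int) := by positivity
      nlinarith

lemma mem_altFactors {n f : Int} (hn : 0 < n) :
    f ∈ pvAltGo n 1 ↔ 1 ≤ f ∧ f ∣ n := by
  rw [mem_altGo hn]
  constructor
  · rintro ⟨d, hd1, hd2, hd3, rfl | ⟨hsq, rfl⟩⟩
    · exact ⟨by exact_mod_cast hd1, hd3⟩
    · have hd0 : (0:Int) < d := by exact_mod_cast hd1
      obtain ⟨hq, _⟩ := div_pos_inv hn hd0 hd3
      exact ⟨hq, ⟨d, (Int.ediv_mul_cancel hd3).symm⟩⟩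
  · rintro ⟨h1, hdvd⟩
    by_cases hsq : f * f ≤ n
    · exact ⟨f, by exact_mod_cast h1, hsq, hdvd, Or.inl rfl⟩
    · push_neg at hsq
      obtain ⟨hq, hinv⟩ := div_pos_inv hn (by omega) hdvd
      have hmul : n / f * f = n := Int.ediv_mul_cancel hdvd
      have hlt : n / f < f := by nlinarith
      have hdd : n / f * (n / f) ≤ n := by nlinarith
      refine ⟨n / f, by exact_mod_cast hq, hdd, ⟨f, hmul.symm⟩, Or.inr ⟨?_, hinv.symm⟩⟩
      intro hc
      nlinarith

lemma nodup_altGo {n : Int} (hn : 0 < n) (i : Nat) : (pvAltGo n i).Nodup := by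
  fun_induction pvAltGo n i with
  | case1 i h ih =>
      rw [List.nodup_append]
      refine ⟨?_, ih, ?_⟩
      · by_cases hm : PySem.Int.mod n (i : Int) = 0
        · rw [if_pos hm]
          have hdvd : (i : Int) ∣ n := (PySem.Int.mod_eq_zero_iff_dvd n _).mp hm
          have hi0 : (0 : Int) < (i : Int) := by
            rcases Nat.eq_zero_or_pos i with h0 | h0
            · exfalso; subst h0; simp at hdvd; omega
            · exact_mod_cast h0
          by_cases hsq : (i : Int) * (i : Int) ≠ n
          · rw [if_pos hsq]
            refine List.nodup_cons.mpr ⟨?_, List.nodup_singleton _⟩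
            rw [List.mem_singleton, PySem.Int.floordiv_eq_ediv_of_pos hi0]
            intro hc
            have hmul : n / (i:Int) * (i:Int) = n := Int.ediv_mul_cancel hdvd
            rw [← hc] at hmul
            exact hsq hmul
          · rw [if_neg hsq]; exact List.nodup_cons.mpr ⟨List.not_mem_nil, List.nodup_nil⟩
        · rw [if_neg hm]; exact List.nodup_nil
      · intro x hx y hy
        by_cases hm : PySem.Int.mod n (i : Int) = 0
        · rw [if_pos hm] at hx
          have hdvd : (i : Int) ∣ n := (PySem.Int.mod_eq_zero_iff_dvd n _).mp hm
          have hi0 : (0 : Int) < (i : Int) := by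
            rcases Nat.eq_zero_or_pos i with h0 | h0
            · exfalso; subst h0; simp at hdvd; omega
            · exact_mod_cast h0
          have hmul : n / (i:Int) * (i:Int) = n := Int.ediv_mul_cancel hdvd
          rw [mem_altGo hn] at hy
          obtain ⟨d, hd1, hd2, hd3, hd4⟩ := hy
          push_cast at hd1
          have hd0 : (0:Int) < d := by omega
          have hdmul : n / d * d = n := Int.ediv_mul_cancel hd3
          have hdq : 0 < n / d := (div_pos_inv hn hd0 hd3).1
          rcases List.mem_cons.mp hx with rfl | hx2
          · -- x = i
            rcases hd4 with rfl | ⟨hsq, rfl⟩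
            · omega
            · -- y = n / d, d ≥ i+1, d*d < n so n/d > d > i
              intro hc
              rw [← hc] at hdmul hdq
              nlinarith
          · by_cases hsq : (i : Int) * (i : Int) ≠ n
            · rw [if_pos hsq, List.mem_singleton] at hx2
              subst hx2
              rw [PySem.Int.floordiv_eq_ediv_of_pos hi0]
              rcases hd4 with rfl | ⟨hsq2, rfl⟩
              · -- n/i = d with d*d ≤ n : then (n/i)² ≤ n, i² ≤ n ⇒ n/i = i ⇒ i*i = n, contra hsq
                intro hc
                rw [hc] at hmul
                nlinarith
              · -- n/i = n/d ⇒ i = d ≥ i+1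
                intro hc
                have h1 := (div_pos_inv hn hi0 hdvd).2
                have h2 := (div_pos_inv hn hd0 hd3).2
                rw [hc, h2] at h1
                omega
            · rw [if_neg hsq] at hx2; simp at hx2
        · rw [if_neg hm] at hx; simp at hx
  | case2 i h => exact List.nodup_nil

lemma getD_foldl_insert_key {κ α ν : Type} [BEq κ] [LawfulBEq κ] [DecidableEq κ]
    (L : List α) (key : α → κ) (upd : ν → α → ν) (e : ν) (d : PySem.Dict κ ν) (k : κ) :
    (L.foldl (fun d a => d.insert (key a) (upd (d.getD (key a) e) a)) d).getD k e
      = (L.filter (fun a => key a == k)).foldl upd (d.getD k e) := by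
  induction L generalizing d with
  | nil => simp
  | cons a L ih =>
      rw [List.foldl_cons, ih, List.filter_cons]
      by_cases hk : key a = k
      · rw [if_pos (by simpa using hk), List.foldl_cons, PySem.Dict.getD_insert, if_pos hk.symm, hk]
      · rw [if_neg (by simpa using hk), PySem.Dict.getD_insert, if_neg (Ne.symm hk)]

lemma getD_foldl_modify_key {κ α ν : Type} [BEq κ] [LawfulBEq κ] [DecidableEq κ]
    (L : List α) (key : α → κ) (upd : ν → α → ν) (e : ν) (d : PySem.Dict κ ν) (k : κ) :
    (L.foldl (fun d a => d.modify (key a) e (fun v => upd v a)) d).getD k e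
      = (L.filter (fun a => key a == k)).foldl upd (d.getD k e) := by
  induction L generalizing d with
  | nil => simp
  | cons a L ih =>
      rw [List.foldl_cons, ih, List.filter_cons]
      by_cases hk : key a = k
      · rw [if_pos (by simpa using hk), List.foldl_cons, PySem.Dict.getD_modify, if_pos hk.symm, hk]
      · rw [if_neg (by simpa using hk), PySem.Dict.getD_modify, if_neg (Ne.symm hk)]

lemma filter_eq_of_nodup {l : List Int} (h : l.Nodup) {f : Int} (hm : f ∈ l) :
    l.filter (· == f) = [f] := by
  induction l with
  | nil => simp at hm
  | cons a l ih =>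
      obtain ⟨ha, hl⟩ := List.nodup_cons.mp h
      rw [List.filter_cons]
      rcases List.mem_cons.mp hm with rfl | hm2
      · rw [if_pos (by simp)]
        have : l.filter (· == f) = [] := by
          rw [List.filter_eq_nil_iff]
          intro b hb
          simp only [beq_iff_eq]
          rintro rfl; exact ha hb
        rw [this]
      · have hne : a ≠ f := by rintro rfl; exact ha hm2
        rw [if_neg (by simpa using hne), ih hl hm2]

lemma filter_flatMap_pairs (nums : List Int) (F : Int → List Int) (hF : ∀ x, (F x).Nodup) (f : Int) :
    ((nums.flatMap (fun x => (F x).map (fun k => (k, x)))).filter (fun p => p.1 == f)).map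
        (fun p => p.2)
      = nums.filter (fun x => decide (f ∈ F x)) := by
  induction nums with
  | nil => simp
  | cons x nums ih =>
      rw [List.flatMap_cons, List.filter_append, List.map_append, ih, List.filter_cons]
      have hhead : ((((F x).map (fun k => (k, x))).filter (fun p => p.1 == f)).map (fun p => p.2))
          = if f ∈ F x then [x] else [] := by
        rw [List.filter_map]
        have hsimp : ((fun (p : Int × Int) => p.1 == f) ∘ fun k => (k, x)) = (fun k => k == f) := by
          funext k; rfl
        rw [hsimp]
        by_cases hm : f ∈ F x
        · rw [if_pos hm, filter_eq_of_nodup (hF x) hm]; simp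
        · rw [if_neg hm]
          have : (F x).filter (· == f) = [] := by
            rw [List.filter_eq_nil_iff]
            intro b hb
            simp only [beq_iff_eq]
            rintro rfl; exact hm hb
          rw [this]; simp
      rw [hhead]
      by_cases hm : f ∈ F x <;> simp [hm]

lemma foldl_pyGcd_dvd_init (l : List Int) (a : Int) : (l.foldl pyGcd a) ∣ a := by
  induction l generalizing a with
  | nil => simp
  | cons x l ih => exact dvd_trans (ih (pyGcd a x)) (by unfold pyGcd; exact Int.gcd_dvd_left a x)

lemma foldl_pyGcd_dvd (l : List Int) (a : Int) : ∀ x ∈ l, (l.foldl pyGcd a) ∣ x := by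
  induction l generalizing a with
  | nil => simp
  | cons y l ih =>
      intro x hx
      rcases List.mem_cons.mp hx with rfl | hx2
      · exact dvd_trans (foldl_pyGcd_dvd_init l (pyGcd a x)) (by unfold pyGcd; exact Int.gcd_dvd_right a x)
      · exact ih (pyGcd a y) x hx2

lemma dvd_foldl_pyGcd {c : Int} (l : List Int) (a : Int) (ha : c ∣ a) (hl : ∀ x ∈ l, c ∣ x) :
    c ∣ l.foldl pyGcd a := by
  induction l generalizing a with
  | nil => simpa
  | cons x l ih =>
      exact ih (pyGcd a x) (by unfold pyGcd; exact Int.dvd_coe_gcd ha (hl x List.mem_cons_self)) (fun y hy => hl y (List.mem_cons_of_mem _ hy))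

lemma foldl_pyGcd_nonneg (l : List Int) (a : Int) (ha : 0 ≤ a) : 0 ≤ l.foldl pyGcd a := by
  induction l generalizing a with
  | nil => simpa
  | cons x l ih => exact ih _ (by unfold pyGcd; exact Int.natCast_nonneg _)

lemma foldl_max_ub (l : List Int) (a : Int) (h : ∀ x ∈ l, x ≤ a) : l.foldl max a = a := by
  induction l with
  | nil => rfl
  | cons x l ih =>
      rw [List.foldl_cons, max_eq_left (h x List.mem_cons_self)]
      exact ih (fun y hy => h y (List.mem_cons_of_mem _ hy))

lemma foldl_max_eq {l : List Int} {a : Int} (hmem : a ∈ l) (hub : ∀ x ∈ l, x ≤ a)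
    {c : Int} (hc : c ≤ a) : l.foldl max c = a := by
  induction l generalizing c with
  | nil => simp at hmem
  | cons x l ih =>
      rw [List.foldl_cons]
      by_cases hxa : x = a
      · subst hxa
        rw [max_eq_right hc]
        by_cases hm2 : x ∈ l
        · exact ih hm2 (fun y hy => hub y (List.mem_cons_of_mem _ hy)) le_rfl
        · exact foldl_max_ub l x (fun y hy => hub y (List.mem_cons_of_mem _ hy))
      · have ha : a ∈ l := by
          rcases List.mem_cons.mp hmem with rfl | h2
          · exact absurd rfl hxa
          · exact h2
        exact ih ha (fun y hy => hub y (List.mem_cons_of_mem _ hy))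
          (max_le hc (hub x List.mem_cons_self))

lemma count_key_classes (K K' : List Int) (Gr : Int → List Int) (gg : Int → Int)
    (vmax : List Int → Int) (m : Int)
    (hK : K.Nodup) (hK' : K'.Nodup) (hmem : ∀ f, f ∈ K ↔ f ∈ K')
    (hggK : ∀ f ∈ K, gg f ∈ K)
    (hGgg : ∀ f ∈ K, Gr (gg f) = Gr f)
    (hggG : ∀ f ∈ K, ∀ f' ∈ K, Gr f = Gr f' → gg f = gg f')
    (hvmax : ∀ f ∈ K, vmax (Gr f) = gg f) :
    ((PySem.List.dedup (K.map Gr)).filter (fun G => decide (vmax G ≤ m))).length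
      = (K'.filter (fun f => decide (gg f = f ∧ f ≤ m))).length := by
  have hnd : (PySem.List.dedup (K.map Gr)).Nodup := PySem.List.nodup_dedup _
  rw [show ((PySem.List.dedup (K.map Gr)).filter (fun G => decide (vmax G ≤ m))).length
      = ((PySem.List.dedup (K.map Gr)).toFinset.filter
          (fun G => (fun G => decide (vmax G ≤ m)) G)).card from by
    rw [← List.toFinset_filter]
    exact (List.toFinset_card_of_nodup (hnd.filter _)).symm]
  rw [show (K'.filter (fun f => decide (gg f = f ∧ f ≤ m))).length
      = (K'.toFinset.filter (fun f => (fun f => decide (gg f = f ∧ f ≤ m)) f)).card from by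
    rw [← List.toFinset_filter]
    exact (List.toFinset_card_of_nodup (hK'.filter _)).symm]
  have hdt : (PySem.List.dedup (K.map Gr)).toFinset = (K.map Gr).toFinset := by
    ext G; simp
  rw [hdt]
  have hKK' : K'.toFinset = K.toFinset := by
    ext f; simp [List.mem_toFinset, hmem f]
  rw [hKK']
  apply Finset.card_bij (fun G _ => vmax G)
  · -- maps into target
    intro G hG
    simp only [Finset.mem_filter, List.mem_toFinset, List.mem_map, decide_eq_true_eq] at hG ⊢
    obtain ⟨⟨f, hf, rfl⟩, hle⟩ := hG
    rw [hvmax f hf] at hle ⊢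
    refine ⟨hggK f hf, ?_, hle⟩
    exact hggG (gg f) (hggK f hf) f hf (hGgg f hf)
  · -- injective
    intro G1 hG1 G2 hG2 heq
    simp only [Finset.mem_filter, List.mem_toFinset, List.mem_map, decide_eq_true_eq] at hG1 hG2
    obtain ⟨⟨f1, hf1, rfl⟩, _⟩ := hG1
    obtain ⟨⟨f2, hf2, rfl⟩, _⟩ := hG2
    rw [hvmax f1 hf1, hvmax f2 hf2] at heq
    rw [← hGgg f1 hf1, ← hGgg f2 hf2, heq]
  · -- surjective
    intro f hf
    simp only [Finset.mem_filter, List.mem_toFinset, decide_eq_true_eq] at hf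
    obtain ⟨hfK, hfix, hle⟩ := hf
    refine ⟨Gr f, ?_, ?_⟩
    · simp only [Finset.mem_filter, List.mem_toFinset, List.mem_map, decide_eq_true_eq]
      exact ⟨⟨f, hfK, rfl⟩, by rw [hvmax f hfK, hfix]; exact hle⟩
    · rw [hvmax f hfK, hfix]


-- proof-only abbreviations: divisibility group, running gcd, key lists, per-group max
def pvGr (nums : List Int) (f : Int) : List Int :=
  nums.filter (fun x => decide (f ∈ getFactors x))
def pvGG (nums : List Int) (f : Int) : Int := (pvGr nums f).foldl pyGcd 0
def pvLA (nums : List Int) : List (Int × Int) :=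
  nums.flatMap (fun x => (getFactors x).map (fun k => (k, x)))
def pvFB (x : Int) : List Int := if 0 < x then pvAltGo x 1 else []
def pvLB (nums : List Int) : List (Int × Int) :=
  nums.flatMap (fun x => (pvFB x).map (fun k => (k, x)))
def pvKA (nums : List Int) : List Int := PySem.Set.ofList ((pvLA nums).map (fun p => p.1))
def pvKB (nums : List Int) : List Int := PySem.Set.ofList ((pvLB nums).map (fun p => p.1))
def pvVmax (nums : List Int) (G : List Int) : Int :=
  ((pvKA nums).filter (fun f => pvGr nums f == G)).foldl max 0

lemma mem_pvFB {x f : Int} : f ∈ pvFB x ↔ f ∈ getFactors x := by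
  unfold pvFB
  by_cases hx : 0 < x
  · rw [if_pos hx, mem_altFactors hx, mem_getFactors hx]
  · rw [if_neg hx, getFactors_of_nonpos (by omega)]

lemma A_count (nums : List Int) (m : Int)
    (hm : PySem.List.min? nums (fun x => x) = some m) :
    gcdOrMin nums =
      (((PySem.List.dedup ((pvKA nums).map (pvGr nums))).filter
          (fun G => decide (pvVmax nums G ≤ m))).length : Int) := by
  have hmp_eq :
      (nums.foldl
        (fun mp num => (getFactors num).foldl (fun mp factor => mp.modify factor [] (· ++ [num])) mp)
        (PySem.Dict.empty : PySem.Dict Int (List Int)))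
      = (pvLA nums).foldl (fun d p => d.modify p.1 [] (fun v => v ++ [p.2])) PySem.Dict.empty := by
    unfold pvLA
    rw [List.foldl_flatMap]
    apply PySem.List.foldl_congr_mem'
    intro x hx acc
    rw [List.foldl_map]
  set mp : PySem.Dict Int (List Int) :=
    (pvLA nums).foldl (fun d p => d.modify p.1 [] (fun v => v ++ [p.2])) PySem.Dict.empty with hmp
  have hgetD : ∀ f, mp.getD f [] = pvGr nums f := by
    intro f
    have h1 := getD_foldl_modify_key (pvLA nums) (fun p => p.1) (fun v a => v ++ [a.2]) []
      PySem.Dict.empty f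
    rw [hmp, h1, PySem.Dict.getD_empty]
    rw [PySem.List.foldl_append_singleton_eq_map, List.nil_append]
    exact filter_flatMap_pairs nums getFactors nodup_getFactors f
  have hnd : mp.keys.Nodup := by
    rw [hmp]
    exact PySem.Dict.nodup_keys_foldl_modify_key _ _ _ _ _ (by simp)
  have hkeys : mp.keys = pvKA nums := by
    have h2 := PySem.Dict.keys_foldl_modify_key (pvLA nums) (fun (p : Int × Int) => p.1)
      ([] : List Int) (fun _ p => (fun v => v ++ [p.2])) PySem.Dict.empty
    rw [PySem.Dict.keys_empty, PySem.Set.update_nil_left] at h2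
    rw [hmp]
    exact h2
  have hitems : mp.items = (pvKA nums).map (fun f => (f, pvGr nums f)) := by
    rw [PySem.Dict.items_eq_map_keys mp hnd [], hkeys]
    apply List.map_congr_left
    intro f hf
    rw [hgetD]
  set gG : PySem.Dict (List Int) Int :=
    mp.items.foldl (fun d fg => d.modify fg.2 0 (fun v => max v fg.1)) PySem.Dict.empty with hgG
  have hGgetD : ∀ G, gG.getD G 0 = pvVmax nums G := by
    intro G
    have h1 := getD_foldl_modify_key mp.items (fun p => p.2) (fun v a => max v a.1) 0
      PySem.Dict.empty G
    rw [hgG, h1, PySem.Dict.getD_empty, hitems, List.filter_map, List.foldl_map]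
    rfl
  have hGnd : gG.keys.Nodup := by
    rw [hgG]
    exact PySem.Dict.nodup_keys_foldl_modify_key _ _ _ _ _ (by simp)
  have hGkeys : gG.keys = PySem.List.dedup ((pvKA nums).map (pvGr nums)) := by
    have h2 := PySem.Dict.keys_foldl_modify_key mp.items (fun (p : Int × List Int) => p.2)
      (0 : Int) (fun _ p => (fun v => max v p.1)) PySem.Dict.empty
    rw [PySem.Dict.keys_empty, PySem.Set.update_nil_left] at h2
    rw [hgG]
    refine h2.trans ?_
    rw [hitems, List.map_map, PySem.List.dedup_eq_ofList]
    rfl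
  have hvals : gG.values = (PySem.List.dedup ((pvKA nums).map (pvGr nums))).map (pvVmax nums) := by
    rw [PySem.Dict.values_eq_map_keys gG hGnd 0, hGkeys]
    apply List.map_congr_left
    intro G hG
    rw [hGgetD]
  unfold gcdOrMin
  dsimp only
  rw [hmp_eq, hm]
  dsimp only
  rw [← hgG, hvals]
  have hind : (fun v : Int => if v ≤ m then (1 : Int) else 0)
      = fun v => if (fun v : Int => decide (v ≤ m)) v = true then (1 : Int) else 0 := by
    funext v
    by_cases h : v ≤ m <;> simp [h]
  rw [hind, PySem.List.sum_map_ite_one_zero, List.countP_map, List.countP_eq_length_filter]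
  rfl

lemma B_count (nums : List Int) (m : Int)
    (hm : PySem.List.min? nums (fun x => x) = some m) :
    gcdOrMin_alt nums =
      (((pvKB nums).filter (fun f => decide (pvGG nums f = f ∧ f ≤ m))).length : Int) := by
  have hFBnodup : ∀ x, (pvFB x).Nodup := by
    intro x
    unfold pvFB
    by_cases hx : 0 < x
    · rw [if_pos hx]; exact nodup_altGo hx 1
    · rw [if_neg hx]; exact List.nodup_nil
  have hbest_eq :
      (nums.foldl
        (fun best num =>
          if num > 0 then
            (altFactorsGo num [] 1).foldl
              (fun best f => best.insert f (pyGcd (best.getD f 0) num)) best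
          else best)
        (PySem.Dict.empty : PySem.Dict Int Int))
      = (pvLB nums).foldl (fun d p => d.insert p.1 (pyGcd (d.getD p.1 0) p.2)) PySem.Dict.empty := by
    unfold pvLB
    rw [List.foldl_flatMap]
    apply PySem.List.foldl_congr_mem'
    intro x hx acc
    unfold pvFB
    by_cases hx0 : 0 < x
    · rw [if_pos hx0, if_pos hx0, altGo_acc, List.nil_append, List.foldl_map]
    · rw [if_neg hx0, if_neg hx0]
      simp
  set best : PySem.Dict Int Int :=
    (pvLB nums).foldl (fun d p => d.insert p.1 (pyGcd (d.getD p.1 0) p.2)) PySem.Dict.empty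
    with hbest
  have hbgetD : ∀ f, best.getD f 0 = pvGG nums f := by
    intro f
    have h1 := getD_foldl_insert_key (pvLB nums) (fun p => p.1) (fun v a => pyGcd v a.2) 0
      PySem.Dict.empty f
    rw [hbest, h1, PySem.Dict.getD_empty, ← List.foldl_map]
    have h3 := filter_flatMap_pairs nums pvFB hFBnodup f
    rw [show (fun (p : Int × Int) => p.2) = Prod.snd from rfl] at h3
    unfold pvLB
    rw [h3]
    unfold pvGG pvGr
    congr 1
    apply List.filter_congr
    intro x hx
    rw [decide_eq_decide]
    exact mem_pvFB
  have hbnd : best.keys.Nodup := by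
    rw [hbest]
    exact PySem.Dict.nodup_keys_foldl_insert_key _ _ _ _ (by simp)
  have hbkeys : best.keys = pvKB nums := by
    have h2 := PySem.Dict.keys_foldl_insert_key (pvLB nums) (fun (p : Int × Int) => p.1)
      (fun d p => pyGcd (d.getD p.1 0) p.2) PySem.Dict.empty
    rw [PySem.Dict.keys_empty, PySem.Set.update_nil_left] at h2
    rw [hbest]
    exact h2
  have hbitems : best.items = (pvKB nums).map (fun f => (f, pvGG nums f)) := by
    rw [PySem.Dict.items_eq_map_keys best hbnd 0, hbkeys]
    apply List.map_congr_left
    intro f hf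
    rw [hbgetD]
  unfold gcdOrMin_alt
  dsimp only
  rw [hbest_eq, hm]
  dsimp only
  rw [hbitems, List.map_map]
  have hind : ((fun fg : Int × Int => if fg.2 = fg.1 ∧ fg.1 ≤ m then (1 : Int) else 0) ∘
        (fun f => (f, pvGG nums f)))
      = fun f => if (fun f => decide (pvGG nums f = f ∧ f ≤ m)) f = true then (1 : Int) else 0 := by
    funext f
    by_cases h : pvGG nums f = f ∧ f ≤ m <;> simp [h]
  rw [hind, PySem.List.sum_map_ite_one_zero, List.countP_eq_length_filter]

lemma mem_pvKA {nums : List Int} {f : Int} :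
    f ∈ pvKA nums ↔ ∃ x ∈ nums, f ∈ getFactors x := by
  unfold pvKA pvLA
  rw [PySem.Set.mem_ofList]
  simp only [List.mem_map, List.mem_flatMap]
  constructor
  · rintro ⟨p, ⟨x', hx', k', hk', hkk⟩, hpf⟩
    subst hkk
    simp only at hpf
    subst hpf
    exact ⟨x', hx', hk'⟩
  · rintro ⟨x, hx, hf⟩
    exact ⟨(f, x), ⟨x, hx, f, hf, rfl⟩, rfl⟩

lemma mem_pvKB {nums : List Int} {f : Int} :
    f ∈ pvKB nums ↔ ∃ x ∈ nums, f ∈ getFactors x := by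
  unfold pvKB pvLB
  rw [PySem.Set.mem_ofList]
  simp only [List.mem_map, List.mem_flatMap]
  constructor
  · rintro ⟨p, ⟨x', hx', k', hk', hkk⟩, hpf⟩
    subst hkk
    simp only at hpf
    subst hpf
    exact ⟨x', hx', mem_pvFB.mp hk'⟩
  · rintro ⟨x, hx, hf⟩
    exact ⟨(f, x), ⟨x, hx, f, mem_pvFB.mpr hf, rfl⟩, rfl⟩

-- the key mathematical facts about a factor key
lemma pos_of_mem_getFactors {x f : Int} (h : f ∈ getFactors x) : 0 < x := by
  by_contra hc
  rw [getFactors_of_nonpos (by omega)] at h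
  simp at h

lemma mem_pvGr {nums : List Int} {f x : Int} :
    x ∈ pvGr nums f ↔ x ∈ nums ∧ f ∈ getFactors x := by
  unfold pvGr
  rw [List.mem_filter]
  simp

lemma key_facts {nums : List Int} {f : Int} (hf : f ∈ pvKA nums) :
    1 ≤ f ∧ 1 ≤ pvGG nums f ∧ f ∣ pvGG nums f ∧ pvGG nums f ∈ pvKA nums ∧
      pvGr nums (pvGG nums f) = pvGr nums f := by
  obtain ⟨x₀, hx₀, hfx₀⟩ := mem_pvKA.mp hf
  have hx₀pos : 0 < x₀ := pos_of_mem_getFactors hfx₀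
  obtain ⟨hf1, hfdvd⟩ := (mem_getFactors hx₀pos).mp hfx₀
  have hx₀G : x₀ ∈ pvGr nums f := mem_pvGr.mpr ⟨hx₀, hfx₀⟩
  have hpos_elt : ∀ x ∈ pvGr nums f, 0 < x ∧ f ∣ x := by
    intro x hx
    obtain ⟨hxn, hxf⟩ := mem_pvGr.mp hx
    have hxp : 0 < x := pos_of_mem_getFactors hxf
    exact ⟨hxp, ((mem_getFactors hxp).mp hxf).2⟩
  have hggdvd : ∀ x ∈ pvGr nums f, pvGG nums f ∣ x := foldl_pyGcd_dvd _ 0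
  have hggnn : 0 ≤ pvGG nums f := foldl_pyGcd_nonneg _ 0 le_rfl
  have hgg1 : 1 ≤ pvGG nums f := by
    rcases Int.lt_or_le 0 (pvGG nums f) with h | h
    · omega
    · have hz : pvGG nums f = 0 := by omega
      have := hggdvd x₀ hx₀G
      rw [hz] at this
      rw [zero_dvd_iff] at this
      omega
  have hfgg : f ∣ pvGG nums f :=
    dvd_foldl_pyGcd _ 0 (dvd_zero f) (fun x hx => (hpos_elt x hx).2)
  refine ⟨hf1, hgg1, hfgg, ?_, ?_⟩
  · exact mem_pvKA.mpr ⟨x₀, hx₀, (mem_getFactors hx₀pos).mpr ⟨hgg1, hggdvd x₀ hx₀G⟩⟩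
  · unfold pvGr
    apply List.filter_congr
    intro x hxn
    rw [decide_eq_decide]
    constructor
    · intro hgx
      have hxp : 0 < x := pos_of_mem_getFactors hgx
      have hggx : pvGG nums f ∣ x := ((mem_getFactors hxp).mp hgx).2
      exact (mem_getFactors hxp).mpr ⟨hf1, dvd_trans hfgg hggx⟩
    · intro hfx
      have hxG : x ∈ pvGr nums f := mem_pvGr.mpr ⟨hxn, hfx⟩
      have hxp : 0 < x := (hpos_elt x hxG).1
      exact (mem_getFactors hxp).mpr ⟨hgg1, hggdvd x hxG⟩

lemma pvGG_congr {nums : List Int} {f f' : Int} (h : pvGr nums f = pvGr nums f') :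
    pvGG nums f = pvGG nums f' := by
  unfold pvGG
  rw [h]

theorem gcdOrMin_eq (nums : List Int) (hpre : nums ≠ []) : gcdOrMin nums = gcdOrMin_alt nums := by
  cases hm : PySem.List.min? nums (fun x => x) with
  | none => exact absurd ((PySem.List.min?_eq_none_iff nums _).mp hm) hpre
  | some m =>
      rw [A_count nums m hm, B_count nums m hm]
      refine congrArg _ ?_
      refine count_key_classes (pvKA nums) (pvKB nums) (pvGr nums) (pvGG nums) (pvVmax nums) m
        ?_ ?_ ?_ ?_ ?_ ?_ ?_
      · exact PySem.Set.nodup_ofList _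
      · exact PySem.Set.nodup_ofList _
      · intro f; exact mem_pvKA.trans mem_pvKB.symm
      · intro f hf; exact (key_facts hf).2.2.2.1
      · intro f hf; exact (key_facts hf).2.2.2.2
      · intro f hf f' hf' hGr; exact pvGG_congr hGr
      · intro f hf
        unfold pvVmax
        obtain ⟨hf1, hgg1, hfgg, hggK, hGrEq⟩ := key_facts hf
        apply foldl_max_eq (a := pvGG nums f)
        · rw [List.mem_filter]
          exact ⟨hggK, by simp [hGrEq]⟩
        · intro y hy
          rw [List.mem_filter] at hy
          obtain ⟨hyK, hyG⟩ := hy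
          have hyGr : pvGr nums y = pvGr nums f := by simpa using hyG
          obtain ⟨hy1, _, hychain, _, _⟩ := key_facts hyK
          have : y ∣ pvGG nums f := by
            rw [← pvGG_congr hyGr]
            exact hychain
          exact Int.le_of_dvd (by omega) this
        · omega

-- ===== VERDICT (by name: the statement is the Claim_ definition above) =====
theorem gcdOrMin_spec : Claim_equal_gcdOrMin := by
  intro nums _ hpre
  unfold Spec_gcdOrMin
  exact gcdOrMin_eq nums hpre
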